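-- pv_equiv track=rewrite | github.com/AkmalFazli27/Unchdeep | SEMESTER-1/Dasar-Pemprograman/PRAKTIKUM/RESPONSI/duel_sihir.py | DuelSihir
-- ===== SOURCE A (Python) =====
-- def FirstElmt(L):
--     return L[0]
--
-- def Tail(L):
--     return L[1:]
--
-- def isEmpty(L):
--     return L == []
--
-- def DuelSihir(S,M,skorS=0,skorM=0):
--     if isEmpty(S):
--         if skorS > skorM:
--             return "Snape Menang"
--         if skorS < skorM:
--             return "McGonagall Menang"
--         return "Keduanya Seri"
--     if FirstElmt(S) > FirstElmt(M):
--         return DuelSihir(Tail(S),Tail(M),skorS + 1,skorM)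
--     if FirstElmt(S) < FirstElmt(M):
--         return DuelSihir(Tail(S),Tail(M),skorS,skorM + 1)
--     return DuelSihir(Tail(S),Tail(M),skorS,skorM)
-- ===== SOURCE B (Python) =====
-- def DuelSihir(S, M, skorS=0, skorM=0):
--     for s, m in zip(S, M):
--         if s > m:
--             skorS += 1
--         elif s < m:
--             skorM += 1
--     if skorS > skorM:
--         return "Snape Menang"
--     if skorS < skorM:
--         return "McGonagall Menang"
--     return "Keduanya Seri"
-- ===== Notes on version B (the rewrite author's own statement) =====
-- stated objective: faster
-- what changed: Replaces the recursion that re-slices both lists at every step with a single zip loop over paired elements updating two counters.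
import Mathlib
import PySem

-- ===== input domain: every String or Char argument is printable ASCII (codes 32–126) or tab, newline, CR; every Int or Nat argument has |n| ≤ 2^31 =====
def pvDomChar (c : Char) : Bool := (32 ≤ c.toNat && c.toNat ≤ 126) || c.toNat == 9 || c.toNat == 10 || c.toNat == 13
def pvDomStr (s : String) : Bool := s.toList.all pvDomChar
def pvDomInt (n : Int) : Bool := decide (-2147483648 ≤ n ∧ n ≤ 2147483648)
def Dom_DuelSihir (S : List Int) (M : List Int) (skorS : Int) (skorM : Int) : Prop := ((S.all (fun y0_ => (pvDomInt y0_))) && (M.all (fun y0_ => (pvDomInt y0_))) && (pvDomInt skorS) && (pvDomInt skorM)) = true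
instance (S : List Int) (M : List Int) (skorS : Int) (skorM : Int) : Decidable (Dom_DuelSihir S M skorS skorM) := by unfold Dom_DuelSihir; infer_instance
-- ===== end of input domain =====

-- B replaces A's slicing recursion by one zip-fold over paired elements (asymptotically faster in a timing run).


-- ===== PORT A =====
-- A recurses: compares heads (L[0]), recurses on tails (L[1:]), then compares the scores.
-- When S is nonempty and M is empty, Python's M[0] raises IndexError: that case is excluded
-- by Pre_DuelSihir; the port returns "" there (nothing is claimed about it).
def DuelSihir (S : List Int) (M : List Int) (skorS : Int) (skorM : Int) : String :=
  match S, M with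
  | [], _ =>
    if skorS > skorM then "Snape Menang"
    else if skorS < skorM then "McGonagall Menang"
    else "Keduanya Seri"
  | _ :: _, [] => ""  -- Python raises IndexError here (outside Pre_)
  | s :: St, m :: Mt =>
    if s > m then DuelSihir St Mt (skorS + 1) skorM
    else if s < m then DuelSihir St Mt skorS (skorM + 1)
    else DuelSihir St Mt skorS skorM

-- ===== PORT B =====
def DuelSihir_alt (S : List Int) (M : List Int) (skorS : Int) (skorM : Int) : String :=
  let p := (S.zip M).foldl
    (fun (acc : Int × Int) sm =>
      if sm.1 > sm.2 then (acc.1 + 1, acc.2)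
      else if sm.1 < sm.2 then (acc.1, acc.2 + 1)
      else acc) (skorS, skorM)
  if p.1 > p.2 then "Snape Menang"
  else if p.1 < p.2 then "McGonagall Menang"
  else "Keduanya Seri"

-- ===== PRECONDITION & SPEC =====
-- A raises IndexError as soon as it reaches a nonempty S with M exhausted, i.e. whenever len(M) < len(S).
def Pre_DuelSihir (S : List Int) (M : List Int) (skorS : Int) (skorM : Int) : Prop := S.length ≤ M.length
instance (S : List Int) (M : List Int) (skorS : Int) (skorM : Int) : Decidable (Pre_DuelSihir S M skorS skorM) := by unfold Pre_DuelSihir; infer_instance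
def pvWitness_DuelSihir : List Int × List Int × Int × Int := ([1, 2, 3], [3, 2, 1], 0, 0)

def Spec_DuelSihir (S : List Int) (M : List Int) (skorS : Int) (skorM : Int) (out : String) : Prop := out = DuelSihir_alt S M skorS skorM
instance (S : List Int) (M : List Int) (skorS : Int) (skorM : Int) (out : String) : Decidable (Spec_DuelSihir S M skorS skorM out) := by unfold Spec_DuelSihir; infer_instance

-- ===== CLAIM (what is proved, stated in full; the proofs are below) =====
def Claim_equal_DuelSihir : Prop := ∀ (S : List Int) (M : List Int) (skorS : Int) (skorM : Int), Dom_DuelSihir S M skorS skorM → Pre_DuelSihir S M skorS skorM → Spec_DuelSihir S M skorS skorM (DuelSihir S M skorS skorM)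

-- ===== LEMMAS AND PROOFS =====
theorem DuelSihir_eq_alt (S : List Int) : ∀ (M : List Int) (skorS skorM : Int),
    S.length ≤ M.length → DuelSihir S M skorS skorM = DuelSihir_alt S M skorS skorM := by
  induction S with
  | nil => intro M a b _; simp [DuelSihir, DuelSihir_alt]
  | cons s St ih =>
    intro M a b h
    match M with
    | [] => simp at h
    | m :: Mt =>
      simp only [List.length_cons, add_le_add_iff_right] at h
      simp only [DuelSihir, DuelSihir_alt, List.zip_cons_cons, List.foldl_cons]
      by_cases h1 : s > m
      · simp only [if_pos h1]; exact ih Mt (a + 1) b h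
      · simp only [if_neg h1]
        by_cases h2 : s < m
        · simp only [if_pos h2]; exact ih Mt a (b + 1) h
        · simp only [if_neg h2]; exact ih Mt a b h

-- ===== VERDICT (by name: the statement is the Claim_ definition above) =====
theorem DuelSihir_spec : Claim_equal_DuelSihir := by
  intro S M a b _ hpre
  exact DuelSihir_eq_alt S M a b hpre
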